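-- pv_equiv track=rewrite | github.com/magomed2000kasimov/practice_MAI_Python | friends.py | splitting_year
-- ===== SOURCE A (Python) =====
-- def splitting_year(string_date):
--     new_string = ''
--     count = 0
--     for char in string_date:
--         if char == '.':
--             count += 1
--             continue
--         if count == 2:
--             new_string += char
--     return new_string
-- ===== SOURCE B (Python) =====
-- def splitting_year(string_date):
--     parts = string_date.split('.')
--     return parts[2] if len(parts) > 2 else ''
-- ===== Notes on version B (the rewrite author's own statement) =====
-- stated objective: simpler
-- what changed: Replaces the character-streaming loop with dot-counter state by a single str.split on the dot character followed by indexing the third segment (with a length guard yielding the empty string).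
import Mathlib
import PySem

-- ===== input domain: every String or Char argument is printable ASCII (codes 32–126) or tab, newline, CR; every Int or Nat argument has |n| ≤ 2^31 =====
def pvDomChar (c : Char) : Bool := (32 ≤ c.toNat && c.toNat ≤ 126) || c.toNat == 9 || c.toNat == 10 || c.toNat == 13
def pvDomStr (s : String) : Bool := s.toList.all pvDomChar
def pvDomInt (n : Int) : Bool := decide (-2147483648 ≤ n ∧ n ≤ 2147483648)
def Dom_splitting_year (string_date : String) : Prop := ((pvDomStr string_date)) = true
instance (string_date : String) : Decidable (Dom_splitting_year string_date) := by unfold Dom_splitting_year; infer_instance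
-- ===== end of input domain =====

-- B replaces A's streaming loop with dot-counter state by split('.') and indexing the third segment (objective: simpler).


-- ===== PORT A =====
-- A's loop: for each char, '.' bumps the counter, otherwise append while the counter is exactly 2.
def splittingYearLoop : List Char → List Char → Nat → List Char
  | [], ns, _ => ns
  | c :: rest, ns, count =>
    if c = '.' then splittingYearLoop rest ns (count + 1)
    else if count = 2 then splittingYearLoop rest (ns ++ [c]) count
    else splittingYearLoop rest ns count

def splitting_year (string_date : String) : String :=
  String.ofList (splittingYearLoop string_date.toList [] 0)

-- ===== PORT B =====
def splitting_year_alt (string_date : String) : String :=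
  let parts := PySem.Chars.splitOn string_date.toList ['.']
  if 2 < parts.length then String.ofList ((PySem.List.pyGet? parts 2).getD []) else ""

-- ===== PRECONDITION & SPEC =====
def Spec_splitting_year (string_date : String) (out : String) : Prop := out = splitting_year_alt string_date
instance (string_date : String) (out : String) : Decidable (Spec_splitting_year string_date out) := by unfold Spec_splitting_year; infer_instance

-- ===== CLAIM (what is proved, stated in full; the proofs are below) =====
def Claim_equal_splitting_year : Prop := ∀ (string_date : String), Dom_splitting_year string_date → Spec_splitting_year string_date (splitting_year string_date)

-- ===== LEMMAS AND PROOFS =====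

-- clean recursive characterisation of splitting on '.': (first segment, remaining segments)
def dotParts : List Char → List Char × List (List Char)
  | [] => ([], [])
  | c :: r =>
    let p := dotParts r
    if c = '.' then ([], p.1 :: p.2) else (c :: p.1, p.2)

theorem splitOn_go_eq (l : List Char) : ∀ (fuel : Nat) (cur : List Char) (acc : List (List Char)),
    l.length ≤ fuel →
    PySem.Chars.splitOn.go ['.'] fuel l cur acc
      = acc.reverse ++ ((cur.reverse ++ (dotParts l).1) :: (dotParts l).2) := by
  induction l with
  | nil =>
    intro fuel cur acc _
    cases fuel <;> simp [PySem.Chars.splitOn.go, dotParts]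
  | cons c r ih =>
    intro fuel cur acc h
    cases fuel with
    | zero => simp at h
    | succ f =>
      by_cases hc : c = '.'
      · subst hc
        simp only [PySem.Chars.splitOn.go, List.isPrefixOf, beq_self_eq_true, Bool.true_and,
          if_pos, List.length_cons, List.drop_succ_cons, List.length_nil, List.drop_zero]
        rw [ih f [] (cur.reverse :: acc) (by simpa using h)]
        simp [dotParts]
      · have hpre : List.isPrefixOf ['.'] (c :: r) = false := by
          simp only [List.isPrefixOf, List.isPrefixOf_nil_left, Bool.and_true]
          exact beq_eq_false_iff_ne.mpr (fun h => hc h.symm)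
        simp only [PySem.Chars.splitOn.go, hpre, Bool.false_eq_true, if_false]
        rw [ih f (c :: cur) acc (by simpa using h)]
        simp [dotParts, hc]

theorem splitOn_eq_dotParts (l : List Char) :
    PySem.Chars.splitOn l ['.'] = (dotParts l).1 :: (dotParts l).2 := by
  have := splitOn_go_eq l (l.length + 1) [] [] (by omega)
  simpa [PySem.Chars.splitOn] using this

theorem loop_ge_three (l : List Char) : ∀ (ns : List Char) (k : Nat), 3 ≤ k →
    splittingYearLoop l ns k = ns := by
  induction l with
  | nil => intro ns k _; simp [splittingYearLoop]
  | cons c r ih =>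
    intro ns k hk
    by_cases hc : c = '.'
    · simp [splittingYearLoop, hc, ih ns (k + 1) (by omega)]
    · have h2 : k ≠ 2 := by omega
      simp [splittingYearLoop, hc, h2, ih ns k hk]

theorem loop_eq (l : List Char) : ∀ (ns : List Char) (k : Nat), k ≤ 2 →
    splittingYearLoop l ns k
      = ns ++ (((dotParts l).1 :: (dotParts l).2).getD (2 - k) []) := by
  induction l with
  | nil => intro ns k hk; interval_cases k <;> simp [splittingYearLoop, dotParts]
  | cons c r ih =>
    intro ns k hk
    by_cases hc : c = '.'
    · subst hc
      simp only [splittingYearLoop, if_pos rfl, dotParts]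
      by_cases hk2 : k = 2
      · subst hk2
        rw [loop_ge_three r ns 3 (by omega)]
        simp
      · rw [ih ns (k + 1) (by omega)]
        interval_cases k <;> simp_all
    · by_cases hk2 : k = 2
      · subst hk2
        simp only [splittingYearLoop, hc, if_false, if_pos rfl, dotParts]
        rw [ih (ns ++ [c]) 2 (by omega)]
        simp [hc]
      · simp only [splittingYearLoop, hc, if_false, hk2, dotParts]
        rw [ih ns k hk]
        interval_cases k <;> simp_all

-- ===== VERDICT (by name: the statement is the Claim_ definition above) =====
theorem splitting_year_spec : Claim_equal_splitting_year := by
  intro s _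
  unfold Spec_splitting_year splitting_year splitting_year_alt
  rw [splitOn_eq_dotParts, loop_eq s.toList [] 0 (by omega)]
  rcases h : (dotParts s.toList).2 with _ | ⟨p1, ps⟩
  · simp
  · rcases ps with _ | ⟨p2, ps'⟩
    · simp
    · simp only [PySem.List.pyGet?, PySem.List.pyIdx?, List.length_cons]
      have h2 : (2 : Int) ≤ (ps'.length : Int) + 1 + 1 := by push_cast; omega
      simp [h2]
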